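-- pv_equiv track=rewrite | github.com/1000Rym/CodeSkillUp | coding_test/greedy/q3_flip_zero_one.py | my_solution
-- ===== SOURCE A (Python) =====
-- def my_solution(numbers):
--     flip_start = False
--     count = 0
--     for i in range(1, len(numbers)):
--         if numbers[i-1] != numbers[i] :
--             flip_start = not flip_start
--             if flip_start : count +=1
--
--     return count
-- ===== SOURCE B (Python) =====
-- def my_solution(numbers):
--     t = sum(1 if x != y else 0 for x, y in zip(numbers, numbers[1:]))
--     return (t + 1) // 2
-- ===== Notes on version B (the rewrite author's own statement) =====
-- stated objective: simpler
-- what changed: Replaces the running flip_start toggle with a single zip-pair transition count T and the closed form (T+1)//2.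
import Mathlib
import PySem

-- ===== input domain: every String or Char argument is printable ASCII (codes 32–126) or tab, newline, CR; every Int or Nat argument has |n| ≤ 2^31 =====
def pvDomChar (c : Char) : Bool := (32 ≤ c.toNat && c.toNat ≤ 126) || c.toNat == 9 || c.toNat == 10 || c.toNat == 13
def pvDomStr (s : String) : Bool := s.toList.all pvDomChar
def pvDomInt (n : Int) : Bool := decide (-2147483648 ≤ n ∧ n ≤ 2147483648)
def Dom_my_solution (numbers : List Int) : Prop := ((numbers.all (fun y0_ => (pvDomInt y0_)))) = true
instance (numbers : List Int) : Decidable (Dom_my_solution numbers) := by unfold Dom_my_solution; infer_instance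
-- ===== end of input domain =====

-- ===== PORT A =====
-- B replaces A's running flip_start toggle with a transition count and the closed form (T+1)//2 (simpler).
def my_solution (numbers : List Int) : Int :=
  ((PySem.List.pyRange 1 (numbers.length : Int) 1).foldl
    (fun (st : Bool × Int) i =>
      if PySem.List.pyGetD numbers (i - 1) 0 ≠ PySem.List.pyGetD numbers i 0 then
        let flip_start := !st.1
        (flip_start, if flip_start then st.2 + 1 else st.2)
      else st)
    (false, 0)).2

-- ===== PORT B =====
def my_solution_alt (numbers : List Int) : Int :=
  let t : Int :=
    ((numbers.zip (PySem.List.slice numbers (some 1) none)).map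
      (fun p => if p.1 ≠ p.2 then (1 : Int) else 0)).sum
  PySem.Int.floordiv (t + 1) 2

-- ===== PRECONDITION & SPEC =====
def Spec_my_solution (numbers : List Int) (out : Int) : Prop := out = my_solution_alt numbers
instance (numbers : List Int) (out : Int) : Decidable (Spec_my_solution numbers out) := by unfold Spec_my_solution; infer_instance

-- ===== CLAIM (what is proved, stated in full; the proofs are below) =====
def Claim_equal_my_solution : Prop := ∀ (numbers : List Int), Dom_my_solution numbers → Spec_my_solution numbers (my_solution numbers)

-- ===== LEMMAS AND PROOFS =====

-- number of adjacent transitions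
def pvT (ys : List Int) : Nat := (ys.zip ys.tail).countP (fun p => decide (p.1 ≠ p.2))

def pvStep (xs : List Int) (st : Bool × Int) (i : Int) : Bool × Int :=
  if PySem.List.pyGetD xs (i - 1) 0 ≠ PySem.List.pyGetD xs i 0 then
    let flip_start := !st.1
    (flip_start, if flip_start then st.2 + 1 else st.2)
  else st

lemma pvT_short (ys : List Int) (h : ys.length ≤ 1) : pvT ys = 0 := by
  match ys, h with
  | [], _ => rfl
  | [a], _ => rfl

lemma pvT_cons_cons (a b : Int) (r : List Int) :
    pvT (a :: b :: r) = (if a ≠ b then 1 else 0) + pvT (b :: r) := by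
  unfold pvT
  simp only [List.tail_cons, List.zip_cons_cons, List.countP_cons]
  by_cases h : a = b <;> simp [h, Nat.add_comm]

lemma pv_loop_inv (xs : List Int) (fuel : Nat) (k : Nat) (b : Bool) (c : Int)
    (hk : 1 ≤ k) (hf : xs.length ≤ k + fuel) :
    ((PySem.List.pyRange (k : Int) (xs.length : Int) 1).foldl (pvStep xs) (b, c)).2
      = c + ((if b then pvT (xs.drop (k-1)) / 2 else (pvT (xs.drop (k-1)) + 1) / 2 : Nat) : Int) := by
  induction fuel generalizing k b c with
  | zero =>
      rw [PySem.List.pyRange_one_eq_nil (by exact_mod_cast hf)]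
      rw [pvT_short _ (by simp; omega)]
      simp
  | succ m ih =>
      by_cases hlt : k < xs.length
      · rw [PySem.List.pyRange_one_cons (by exact_mod_cast hlt)]
        simp only [List.foldl_cons]
        have hm1 : k - 1 + 1 = k := by omega
        have hdk1 : xs.drop (k-1) = xs[k-1] :: xs.drop k := by
          rw [List.drop_eq_getElem_cons (by omega), hm1]
        have hdk : xs.drop k = xs[k] :: xs.drop (k+1) := List.drop_eq_getElem_cons hlt
        have hstep : pvStep xs (b, c) (k : Int) =
            (if xs[k-1] ≠ xs[k] then ((!b), if (!b) then c + 1 else c) else (b, c)) := by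
          unfold pvStep
          rw [PySem.List.pyGetD_eq_getElem xs 0 (by omega) (by omega),
              PySem.List.pyGetD_eq_getElem xs 0 (by omega) (by omega)]
          have e1 : ((k : Int) - 1).toNat = k - 1 := by omega
          have e2 : ((k : Int)).toNat = k := by omega
          simp [e1, e2]
        have hk1 : ((k : Int) + 1) = ((k + 1 : Nat) : Int) := by omega
        have hkk : k + 1 - 1 = k := by omega
        rw [hstep, hdk1, hdk, pvT_cons_cons, ← hdk]
        by_cases hne : xs[k-1] ≠ xs[k]
        · simp only [if_pos hne]
          rw [hk1, ih (k+1) (!b) (if (!b) then c + 1 else c) (by omega) (by omega), hkk]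
          cases b <;> simp <;> omega
        · simp only [if_neg hne]
          rw [hk1, ih (k+1) b c (by omega) (by omega), hkk]
          simp
      · rw [PySem.List.pyRange_one_eq_nil (by exact_mod_cast (by omega : xs.length ≤ k))]
        rw [pvT_short _ (by simp; omega)]
        simp

lemma pv_alt_eq (xs : List Int) :
    my_solution_alt xs = (((pvT xs + 1) / 2 : Nat) : Int) := by
  unfold my_solution_alt
  rw [PySem.List.slice_from_one]
  have hsum : ((xs.zip xs.tail).map (fun p => if p.1 ≠ p.2 then (1 : Int) else 0)).sum
      = (pvT xs : Int) := by
    unfold pvT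
    induction xs.zip xs.tail with
    | nil => simp
    | cons p r ih =>
        simp only [List.map_cons, List.sum_cons, List.countP_cons, ih]
        by_cases h : p.1 = p.2 <;> simp [h, add_comm]
  simp only [hsum]
  have h1 : (pvT xs : Int) + 1 = (((pvT xs + 1 : Nat)) : Int) := by push_cast; ring
  rw [h1]
  exact_mod_cast PySem.Int.floordiv_natCast (pvT xs + 1) 2

-- ===== VERDICT (by name: the statement is the Claim_ definition above) =====
theorem my_solution_spec : Claim_equal_my_solution := by
  intro numbers _
  unfold Spec_my_solution
  rw [pv_alt_eq]
  show ((PySem.List.pyRange ((1:Nat) : Int) (numbers.length : Int) 1).foldl (pvStep numbers) (false, 0)).2 = _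
  rw [pv_loop_inv numbers numbers.length 1 false 0 (by omega) (by omega)]
  simp
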